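-- pv_equiv track=rewrite | github.com/vowstar/systemrdl-toolkit | script/compare_implementations.py | errors_similar
-- ===== SOURCE A (Python) =====
-- def errors_similar(cpp_errors, python_errors):
--     """Check if error messages are conceptually similar"""
--     if not cpp_errors and not python_errors:
--         return True
--     if not cpp_errors or not python_errors:
--         return False
--
--     # Check for key error concepts
--     cpp_concepts = set()
--     python_concepts = set()
--
--     for error in cpp_errors:
--         if 'overlap' in error.lower():
--             cpp_concepts.add('overlap')
--         if 'exceed' in error.lower() or 'boundary' in error.lower():
--             cpp_concepts.add('boundary')
--         if 'power of 2' in error.lower():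
--             cpp_concepts.add('power_of_2')
--
--     for error in python_errors:
--         if 'overlap' in error.lower():
--             python_concepts.add('overlap')
--         if 'exceed' in error.lower() or 'boundary' in error.lower():
--             python_concepts.add('boundary')
--         if 'power of 2' in error.lower():
--             python_concepts.add('power_of_2')
--
--     return len(cpp_concepts.intersection(python_concepts)) > 0
-- ===== SOURCE B (Python) =====
-- CONCEPT_RULES = [('overlap',), ('exceed', 'boundary'), ('power of 2',)]
--
-- def _mentions(errors, keywords):
--     return any(kw in error.lower() for error in errors for kw in keywords)
--
-- def errors_similar(cpp_errors, python_errors):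
--     """Check if error messages are conceptually similar"""
--     if not cpp_errors and not python_errors:
--         return True
--     if not cpp_errors or not python_errors:
--         return False
--     return any(_mentions(cpp_errors, kws) and _mentions(python_errors, kws)
--                for kws in CONCEPT_RULES)
-- ===== Notes on version B (the rewrite author's own statement) =====
-- stated objective: simpler
-- what changed: Replaces the two set-building loops plus set intersection with a data-driven concept table: for each (keyword-tuple) rule, a small 'mentions' helper checks each side directly, short-circuiting on the first concept both lists mention.
import Mathlib
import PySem

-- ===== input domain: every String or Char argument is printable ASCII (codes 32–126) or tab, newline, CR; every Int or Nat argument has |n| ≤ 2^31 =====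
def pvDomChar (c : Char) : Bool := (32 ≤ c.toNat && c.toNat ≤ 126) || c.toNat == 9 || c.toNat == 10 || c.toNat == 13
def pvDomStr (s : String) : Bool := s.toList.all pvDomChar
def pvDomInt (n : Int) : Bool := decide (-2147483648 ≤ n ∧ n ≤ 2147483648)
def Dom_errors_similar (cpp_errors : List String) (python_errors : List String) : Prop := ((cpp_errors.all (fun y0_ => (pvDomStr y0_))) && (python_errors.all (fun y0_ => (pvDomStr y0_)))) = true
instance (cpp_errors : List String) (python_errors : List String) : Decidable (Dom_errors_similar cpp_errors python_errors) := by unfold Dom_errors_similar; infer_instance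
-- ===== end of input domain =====

-- B replaces A's two set-building loops + intersection with a data-driven concept table
-- scanned concept-by-concept with short-circuit; simpler decomposition, same cost.


-- ===== PORT A =====
-- the body of both 'for error in …' loops of A, step for step
def pvConceptStep (s : PySem.Set String) (error : String) : PySem.Set String :=
  let s := if PySem.Str.isIn "overlap" (PySem.Str.lower error) then PySem.Set.add s "overlap" else s
  let s := if PySem.Str.isIn "exceed" (PySem.Str.lower error) || PySem.Str.isIn "boundary" (PySem.Str.lower error)
           then PySem.Set.add s "boundary" else s
  if PySem.Str.isIn "power of 2" (PySem.Str.lower error) then PySem.Set.add s "power_of_2" else s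

def errors_similar (cpp_errors : List String) (python_errors : List String) : Bool :=
  if cpp_errors.isEmpty && python_errors.isEmpty then true
  else if cpp_errors.isEmpty || python_errors.isEmpty then false
  else
    let cpp_concepts := cpp_errors.foldl pvConceptStep PySem.Set.empty
    let python_concepts := python_errors.foldl pvConceptStep PySem.Set.empty
    decide (0 < (PySem.Set.inter cpp_concepts python_concepts).length)

-- ===== PORT B =====
def pvConceptRules : List (List String) := [["overlap"], ["exceed", "boundary"], ["power of 2"]]

def pvMentions (errors : List String) (keywords : List String) : Bool :=
  errors.any (fun error => keywords.any (fun kw => PySem.Str.isIn kw (PySem.Str.lower error)))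

def errors_similar_alt (cpp_errors : List String) (python_errors : List String) : Bool :=
  if cpp_errors.isEmpty && python_errors.isEmpty then true
  else if cpp_errors.isEmpty || python_errors.isEmpty then false
  else pvConceptRules.any (fun kws => pvMentions cpp_errors kws && pvMentions python_errors kws)

-- ===== PRECONDITION & SPEC =====
def Spec_errors_similar (cpp_errors : List String) (python_errors : List String) (out : Bool) : Prop := out = errors_similar_alt cpp_errors python_errors
instance (cpp_errors : List String) (python_errors : List String) (out : Bool) : Decidable (Spec_errors_similar cpp_errors python_errors out) := by unfold Spec_errors_similar; infer_instance

-- ===== CLAIM (what is proved, stated in full; the proofs are below) =====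
def Claim_equal_errors_similar : Prop := ∀ (cpp_errors : List String) (python_errors : List String), Dom_errors_similar cpp_errors python_errors → Spec_errors_similar cpp_errors python_errors (errors_similar cpp_errors python_errors)

-- ===== LEMMAS AND PROOFS =====

def pvOv (e : String) : Bool := PySem.Str.isIn "overlap" (PySem.Str.lower e)
def pvBd (e : String) : Bool := PySem.Str.isIn "exceed" (PySem.Str.lower e) || PySem.Str.isIn "boundary" (PySem.Str.lower e)
def pvP2 (e : String) : Bool := PySem.Str.isIn "power of 2" (PySem.Str.lower e)

theorem mem_ite_add (b : Bool) (s : PySem.Set String) (x c : String) :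
    (c ∈ if b then PySem.Set.add s x else s) ↔ c ∈ s ∨ (b = true ∧ c = x) := by
  cases b <;> simp [PySem.Set.mem_add]

theorem mem_conceptStep (s : PySem.Set String) (e : String) (c : String) :
    (c ∈ pvConceptStep s e) ↔
      c ∈ s ∨ (pvOv e = true ∧ c = "overlap") ∨ (pvBd e = true ∧ c = "boundary") ∨ (pvP2 e = true ∧ c = "power_of_2") := by
  simp only [pvConceptStep, pvOv, pvBd, pvP2, mem_ite_add]
  simp [or_assoc]

-- membership in the folded concept set, characterised
set_option maxHeartbeats 1000000 in
theorem mem_concept_fold (l : List String) (s : PySem.Set String) (c : String) :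
    (c ∈ l.foldl pvConceptStep s) ↔
      c ∈ s ∨ (c = "overlap" ∧ l.any pvOv) ∨ (c = "boundary" ∧ l.any pvBd) ∨ (c = "power_of_2" ∧ l.any pvP2) := by
  induction l generalizing s with
  | nil => simp
  | cons e t ih =>
    simp only [List.foldl_cons, ih, List.any_cons]
    rw [mem_conceptStep]
    simp only [Bool.or_eq_true]
    aesop

theorem errors_similar_spec : Claim_equal_errors_similar := by
  intro cpp py _
  unfold Spec_errors_similar errors_similar errors_similar_alt
  split_ifs with h1 h2
  · rfl
  · rfl
  · rw [Bool.eq_iff_iff]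
    constructor
    · intro hlen
      rw [decide_eq_true_eq] at hlen
      have hne : PySem.Set.inter (cpp.foldl pvConceptStep PySem.Set.empty) (py.foldl pvConceptStep PySem.Set.empty) ≠ [] := by
        intro h; rw [h] at hlen; simp at hlen
      obtain ⟨c, hc⟩ := List.exists_mem_of_ne_nil _ hne
      rw [PySem.Set.mem_inter] at hc
      obtain ⟨hc1, hc2⟩ := hc
      rw [mem_concept_fold] at hc1 hc2
      simp only [PySem.Set.empty, List.not_mem_nil, false_or] at hc1 hc2
      simp only [pvConceptRules, pvMentions, List.any_cons, List.any_nil, Bool.or_false,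
        Bool.and_eq_true, Bool.or_eq_true]
      rcases hc1 with ⟨rfl, h1⟩ | ⟨rfl, h1⟩ | ⟨rfl, h1⟩ <;>
        rcases hc2 with ⟨he, h2⟩ | ⟨he, h2⟩ | ⟨he, h2⟩ <;> simp_all [pvOv, pvBd, pvP2]
    · intro hb
      simp only [pvConceptRules, pvMentions, List.any_cons, List.any_nil, Bool.or_false,
        Bool.and_eq_true, Bool.or_eq_true] at hb
      have : ∃ c, c ∈ PySem.Set.inter (cpp.foldl pvConceptStep PySem.Set.empty) (py.foldl pvConceptStep PySem.Set.empty) := by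
        rcases hb with ⟨h1, h2⟩ | ⟨h1, h2⟩ | ⟨h1, h2⟩
        · exact ⟨"overlap", by rw [PySem.Set.mem_inter, mem_concept_fold, mem_concept_fold]; simp_all [pvOv, pvBd, pvP2]⟩
        · exact ⟨"boundary", by rw [PySem.Set.mem_inter, mem_concept_fold, mem_concept_fold]; simp_all [pvOv, pvBd, pvP2]⟩
        · exact ⟨"power_of_2", by rw [PySem.Set.mem_inter, mem_concept_fold, mem_concept_fold]; simp_all [pvOv, pvBd, pvP2]⟩
      obtain ⟨c, hc⟩ := this
      exact decide_eq_true (List.length_pos_of_mem hc)
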